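-- pv_equiv track=rewrite | github.com/jpmajesty2025/sportsbrain | backend/scripts/load_postgres_draft_data.py | _get_division
-- ===== SOURCE A (Python) =====
-- def _get_division(abbreviation: str) -> str:
--     """Get division for team"""
--     divisions = {
--         'Atlantic': ['BOS', 'BKN', 'NYK', 'PHI', 'TOR'],
--         'Central': ['CHI', 'CLE', 'DET', 'IND', 'MIL'],
--         'Southeast': ['ATL', 'CHA', 'MIA', 'ORL', 'WAS'],
--         'Northwest': ['DEN', 'MIN', 'OKC', 'POR', 'UTA'],
--         'Pacific': ['GSW', 'LAC', 'LAL', 'PHX', 'SAC'],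
--         'Southwest': ['DAL', 'HOU', 'MEM', 'NOP', 'SAS']
--     }
--
--     for division, teams in divisions.items():
--         if abbreviation in teams:
--             return division
--     return "Unknown"
-- ===== SOURCE B (Python) =====
-- _TEAM_TO_DIVISION = {
--     'BOS': 'Atlantic', 'BKN': 'Atlantic', 'NYK': 'Atlantic', 'PHI': 'Atlantic', 'TOR': 'Atlantic',
--     'CHI': 'Central', 'CLE': 'Central', 'DET': 'Central', 'IND': 'Central', 'MIL': 'Central',
--     'ATL': 'Southeast', 'CHA': 'Southeast', 'MIA': 'Southeast', 'ORL': 'Southeast', 'WAS': 'Southeast',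
--     'DEN': 'Northwest', 'MIN': 'Northwest', 'OKC': 'Northwest', 'POR': 'Northwest', 'UTA': 'Northwest',
--     'GSW': 'Pacific', 'LAC': 'Pacific', 'LAL': 'Pacific', 'PHX': 'Pacific', 'SAC': 'Pacific',
--     'DAL': 'Southwest', 'HOU': 'Southwest', 'MEM': 'Southwest', 'NOP': 'Southwest', 'SAS': 'Southwest',
-- }
--
-- def _get_division(abbreviation: str) -> str:
--     """Get division for team"""
--     return _TEAM_TO_DIVISION.get(abbreviation, "Unknown")
-- ===== Notes on version B (the rewrite author's own statement) =====
-- stated objective: simpler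
-- what changed: Replaces the loop over division-keyed lists with an inner membership test by a single O(1) lookup in a flat team-keyed dictionary built once at module load.
import Mathlib
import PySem

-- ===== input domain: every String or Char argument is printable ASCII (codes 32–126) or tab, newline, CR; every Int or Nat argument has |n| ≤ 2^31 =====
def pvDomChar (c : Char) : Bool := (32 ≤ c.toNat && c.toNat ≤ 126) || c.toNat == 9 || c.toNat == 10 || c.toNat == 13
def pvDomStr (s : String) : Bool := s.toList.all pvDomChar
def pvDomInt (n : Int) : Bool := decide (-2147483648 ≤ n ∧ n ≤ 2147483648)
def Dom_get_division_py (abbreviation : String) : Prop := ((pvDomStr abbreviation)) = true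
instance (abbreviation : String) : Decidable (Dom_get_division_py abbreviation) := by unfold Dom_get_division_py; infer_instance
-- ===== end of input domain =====

set_option maxHeartbeats 2000000


-- B replaces A's scan over division-keyed team lists by one lookup in a flat team-keyed dict (simpler).

-- ===== PORT A =====
-- the divisions dict, as in A
def pvDivisionsA : PySem.Dict String (List String) := PySem.Dict.ofList
  [("Atlantic", ["BOS", "BKN", "NYK", "PHI", "TOR"]),
   ("Central", ["CHI", "CLE", "DET", "IND", "MIL"]),
   ("Southeast", ["ATL", "CHA", "MIA", "ORL", "WAS"]),
   ("Northwest", ["DEN", "MIN", "OKC", "POR", "UTA"]),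
   ("Pacific", ["GSW", "LAC", "LAL", "PHX", "SAC"]),
   ("Southwest", ["DAL", "HOU", "MEM", "NOP", "SAS"])]

-- the for-loop over divisions.items() with early return
def pvLoopA (abbreviation : String) : List (String × List String) → String
  | [] => "Unknown"
  | (division, teams) :: rest =>
      if teams.contains abbreviation then division else pvLoopA abbreviation rest

def get_division_py (abbreviation : String) : String :=
  pvLoopA abbreviation pvDivisionsA.items

-- ===== PORT B =====
-- the flat module-level team → division dict of Source B
def pvTeamToDivision : PySem.Dict String String := PySem.Dict.ofList
  [("BOS", "Atlantic"), ("BKN", "Atlantic"), ("NYK", "Atlantic"), ("PHI", "Atlantic"), ("TOR", "Atlantic"),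
   ("CHI", "Central"), ("CLE", "Central"), ("DET", "Central"), ("IND", "Central"), ("MIL", "Central"),
   ("ATL", "Southeast"), ("CHA", "Southeast"), ("MIA", "Southeast"), ("ORL", "Southeast"), ("WAS", "Southeast"),
   ("DEN", "Northwest"), ("MIN", "Northwest"), ("OKC", "Northwest"), ("POR", "Northwest"), ("UTA", "Northwest"),
   ("GSW", "Pacific"), ("LAC", "Pacific"), ("LAL", "Pacific"), ("PHX", "Pacific"), ("SAC", "Pacific"),
   ("DAL", "Southwest"), ("HOU", "Southwest"), ("MEM", "Southwest"), ("NOP", "Southwest"), ("SAS", "Southwest")]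

def get_division_py_alt (abbreviation : String) : String :=
  pvTeamToDivision.getD abbreviation "Unknown"

-- ===== PRECONDITION & SPEC =====
def Spec_get_division_py (abbreviation : String) (out : String) : Prop := out = get_division_py_alt abbreviation
instance (abbreviation : String) (out : String) : Decidable (Spec_get_division_py abbreviation out) := by unfold Spec_get_division_py; infer_instance

-- ===== CLAIM (what is proved, stated in full; the proofs are below) =====
def Claim_equal_get_division_py : Prop := ∀ (abbreviation : String), Dom_get_division_py abbreviation → Spec_get_division_py abbreviation (get_division_py abbreviation)

-- ===== LEMMAS AND PROOFS =====

-- ===== VERDICT (by name: the statement is the Claim_ definition above) =====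
theorem get_division_py_spec : Claim_equal_get_division_py := by
  intro ab _
  have hA : pvDivisionsA.items =
      [("Atlantic", ["BOS", "BKN", "NYK", "PHI", "TOR"]),
       ("Central", ["CHI", "CLE", "DET", "IND", "MIL"]),
       ("Southeast", ["ATL", "CHA", "MIA", "ORL", "WAS"]),
       ("Northwest", ["DEN", "MIN", "OKC", "POR", "UTA"]),
       ("Pacific", ["GSW", "LAC", "LAL", "PHX", "SAC"]),
       ("Southwest", ["DAL", "HOU", "MEM", "NOP", "SAS"])] := by decide
  have hB : pvTeamToDivision.items =
      [("BOS", "Atlantic"), ("BKN", "Atlantic"), ("NYK", "Atlantic"), ("PHI", "Atlantic"), ("TOR", "Atlantic"),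
       ("CHI", "Central"), ("CLE", "Central"), ("DET", "Central"), ("IND", "Central"), ("MIL", "Central"),
       ("ATL", "Southeast"), ("CHA", "Southeast"), ("MIA", "Southeast"), ("ORL", "Southeast"), ("WAS", "Southeast"),
       ("DEN", "Northwest"), ("MIN", "Northwest"), ("OKC", "Northwest"), ("POR", "Northwest"), ("UTA", "Northwest"),
       ("GSW", "Pacific"), ("LAC", "Pacific"), ("LAL", "Pacific"), ("PHX", "Pacific"), ("SAC", "Pacific"),
       ("DAL", "Southwest"), ("HOU", "Southwest"), ("MEM", "Southwest"), ("NOP", "Southwest"), ("SAS", "Southwest")] := by decide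
  unfold Spec_get_division_py get_division_py get_division_py_alt
  rw [PySem.Dict.getD, PySem.Dict.get?, hA, hB]
  simp only [pvLoopA, List.find?, List.contains, List.elem]
  repeat' split <;> simp_all
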